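-- pv_equiv track=rewrite | github.com/SaiSudhaV/coding_platforms | farmer.py | calculate
-- ===== SOURCE A (Python) =====
-- def calculate(m, n):
--     temp, res = 1, []
--     while True:
--         t = m + n + temp
--         if prime(t):
--             res.append(temp)
--             break
--         temp += 1
--     return " ".join(str(i) for i in res)
--
-- def prime(n):
--     for i in range(2,(n // 2) + 1):
--         if n % i == 0:
--             return False
--     else:
--         return True
-- ===== SOURCE B (Python) =====
-- def calculate(m, n):
--     # iterate over the candidate sum t directly; trial division only up to sqrt(t)
--     s = m + n
--     t = s + 1
--     while not _accepts(t):
--         t += 1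
--     return str(t - s)
--
-- def _accepts(t):
--     # True exactly where A's divisor scan over [2, t//2] finds no divisor:
--     # vacuously true for t < 4, ordinary primality for t >= 4
--     if t < 4:
--         return True
--     if t % 2 == 0:
--         return False
--     d = 3
--     while d * d <= t:
--         if t % d == 0:
--             return False
--         d += 2
--     return True
-- ===== Notes on version B (the rewrite author's own statement) =====
-- stated objective: faster
-- what changed: B iterates over the candidate sum t directly and tests primality by trial division over odd divisors up to sqrt(t) (after one parity check), instead of A's scan of every divisor up to t//2.
import Mathlib
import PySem

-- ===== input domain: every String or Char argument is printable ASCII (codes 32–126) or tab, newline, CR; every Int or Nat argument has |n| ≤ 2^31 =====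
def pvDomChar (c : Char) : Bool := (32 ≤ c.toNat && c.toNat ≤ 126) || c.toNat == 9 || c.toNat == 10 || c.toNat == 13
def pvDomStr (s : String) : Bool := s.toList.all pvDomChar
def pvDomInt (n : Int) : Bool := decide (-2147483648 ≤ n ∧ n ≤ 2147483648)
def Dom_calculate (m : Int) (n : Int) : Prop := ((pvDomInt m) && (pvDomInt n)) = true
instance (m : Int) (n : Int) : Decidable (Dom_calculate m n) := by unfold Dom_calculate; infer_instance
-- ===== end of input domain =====

-- B replaces A's divisor scan up to t//2 by trial division over odd divisors up to sqrt(t),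
-- iterating over the candidate sum t directly (objective: faster, measured).
-- The `fuel` arguments below are totality guards only (the Python loops are unbounded while-loops);
-- fuel (m+n).toNat + 2 always suffices (Bertrand), and both ports use the same guard.

-- ===== PORT A =====
-- prime(n) from A: scan i in range(2, n//2 + 1)
def primeA (t : Int) : Bool :=
  (PySem.List.pyRange 2 (PySem.Int.floordiv t 2 + 1) 1).all (fun i => !(PySem.Int.mod t i == 0))

-- the while-True loop of A over temp
def loopA (fuel : Nat) (m n temp : Int) : Int :=
  match fuel with
  | 0 => temp
  | fuel + 1 =>
    let t := m + n + temp
    if primeA t then temp else loopA fuel m n (temp + 1)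

def calculate (m : Int) (n : Int) : String :=
  let temp := loopA ((m + n).toNat + 2) m n 1
  let res := [temp]
  PySem.Str.join " " (res.map (fun i => PySem.Int.toStr i))

-- ===== PORT B =====
-- the inner `while d*d <= t` loop of _accepts
def trialB (t d : Int) : Bool :=
  if h : d * d ≤ t then
    (if PySem.Int.mod t d == 0 then false else trialB t (d + 2))
  else true
termination_by (t + 1 - d).toNat
decreasing_by
  have hd : d ≤ t := by nlinarith [mul_self_nonneg (d - 1)]
  omega

def accB (t : Int) : Bool :=
  if t < 4 then true
  else if PySem.Int.mod t 2 == 0 then false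
  else trialB t 3

-- the `while not _accepts(t)` loop of B over t
def loopB (fuel : Nat) (t : Int) : Int :=
  match fuel with
  | 0 => t
  | fuel + 1 => if accB t then t else loopB fuel (t + 1)

def calculate_alt (m : Int) (n : Int) : String :=
  let s := m + n
  let t := loopB (s.toNat + 2) (s + 1)
  PySem.Int.toStr (t - s)

-- ===== PRECONDITION & SPEC =====
def Spec_calculate (m : Int) (n : Int) (out : String) : Prop := out = calculate_alt m n
instance (m : Int) (n : Int) (out : String) : Decidable (Spec_calculate m n out) := by unfold Spec_calculate; infer_instance

-- ===== CLAIM (what is proved, stated in full; the proofs are below) =====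
def Claim_equal_calculate : Prop := ∀ (m : Int) (n : Int), Dom_calculate m n → Spec_calculate m n (calculate m n)

-- ===== LEMMAS AND PROOFS =====

theorem join_singleton (x : String) : PySem.Str.join " " [x] = x := by
  simp [PySem.Str.join]

theorem primeA_iff (N : ℕ) :
    primeA (N : Int) = true ↔ ∀ k : ℕ, 2 ≤ k → k ≤ N / 2 → ¬ k ∣ N := by
  unfold primeA
  rw [show PySem.Int.floordiv (N : Int) 2 = ((N / 2 : ℕ) : Int) from by
    exact_mod_cast PySem.Int.floordiv_natCast N 2]
  simp only [List.all_eq_true, PySem.List.mem_pyRange_one, Bool.not_eq_eq_eq_not,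
    Bool.not_true, beq_eq_false_iff_ne, ne_eq, and_imp]
  constructor
  · intro h k hk2 hk hdvd
    have hmod := h (k : Int) (by exact_mod_cast hk2) (by push_cast; omega)
    exact hmod (by rw [PySem.Int.mod_eq_zero_iff_dvd]; exact_mod_cast hdvd)
  · intro h i hi2 hilt hmod
    rw [PySem.Int.mod_eq_zero_iff_dvd] at hmod
    lift i to ℕ using (by omega) with k
    exact h k (by exact_mod_cast hi2) (by exact_mod_cast (by omega : (k : Int) ≤ ((N / 2 : ℕ) : Int))) (by exact_mod_cast hmod)

theorem trialB_iff : ∀ (fuel : ℕ) (t d : Int), (t + 1 - d).toNat ≤ fuel → 1 ≤ d →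
    (trialB t d = true ↔ ∀ j : ℕ, (d + 2 * j) * (d + 2 * j) ≤ t → ¬ (d + 2 * (j : Int)) ∣ t) := by
  intro fuel
  induction fuel with
  | zero =>
    intro t d hle hd
    have ht : t < d := by omega
    have hdd : ¬ d * d ≤ t := by nlinarith
    rw [trialB]
    simp only [hdd, dite_false, true_iff]
    intro j hj
    exfalso
    have h1 : d ≤ d + 2 * (j : Int) := by omega
    nlinarith
  | succ fuel ih =>
    intro t d hle hd
    rw [trialB]
    by_cases h : d * d ≤ t
    · have hdt : d ≤ t := by nlinarith
      simp only [h, dite_true]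
      by_cases hdvd : d ∣ t
      · have hmod : (PySem.Int.mod t d == 0) = true := by
          simp [PySem.Int.mod_eq_zero_iff_dvd, hdvd]
        simp only [hmod, if_true, Bool.false_eq_true, false_iff]
        intro hall
        exact (hall 0 (by simpa using h)) (by simpa using hdvd)
      · have hmod : (PySem.Int.mod t d == 0) = false := by
          simp [PySem.Int.mod_eq_zero_iff_dvd, hdvd]
        simp only [hmod, Bool.false_eq_true, if_false]
        rw [ih t (d + 2) (by omega) (by omega)]
        constructor
        · intro h2 j hj hjd
          match j with
          | 0 => exact hdvd (by simpa using hjd)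
          | j + 1 =>
            have e1 : d + 2 * ((j : Int) + 1) = d + 2 + 2 * (j : Int) := by ring
            push_cast at hj hjd
            rw [e1] at hj hjd
            exact h2 j hj hjd
        · intro h2 j hj hjd
          have e1 : d + 2 + 2 * (j : Int) = d + 2 * ((j + 1 : ℕ) : Int) := by push_cast; ring
          rw [e1] at hj hjd
          exact h2 (j + 1) (by push_cast at hj ⊢; linarith) hjd
    · simp only [h, dite_false, true_iff]
      intro j hj
      exfalso
      have h1 : d ≤ d + 2 * (j : Int) := by omega
      nlinarith
theorem primeA_prime (N : ℕ) (h : 4 ≤ N) : primeA (N : Int) = true ↔ N.Prime := by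
  rw [primeA_iff]
  constructor
  · intro h1
    by_contra hnp
    have hp : N.minFac.Prime := Nat.minFac_prime (by omega)
    have hd : N.minFac ∣ N := Nat.minFac_dvd N
    have hsq : N.minFac * N.minFac ≤ N := by
      have := Nat.minFac_sq_le_self (by omega) hnp
      simpa [pow_two] using this
    have h2 : 2 ≤ N.minFac := hp.two_le
    exact h1 N.minFac h2 (by rw [Nat.le_div_iff_mul_le (by omega)]; nlinarith) hd
  · intro hp k h2 hk hdvd
    have hkN : k < N := by
      have : N / 2 < N := Nat.div_lt_self (by omega) one_lt_two
      omega
    have := (Nat.prime_def_lt.mp hp).2 k hkN hdvd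
    omega

theorem trialB_prime (N : ℕ) (h : 4 ≤ N) (hodd : ¬ 2 ∣ N) : trialB (N : Int) 3 = true ↔ N.Prime := by
  rw [trialB_iff ((N : Int) + 1 - 3).toNat (N : Int) 3 le_rfl (by omega)]
  constructor
  · intro h1
    by_contra hnp
    have hp : N.minFac.Prime := Nat.minFac_prime (by omega)
    have hd : N.minFac ∣ N := Nat.minFac_dvd N
    have hsq : N.minFac * N.minFac ≤ N := by
      have := Nat.minFac_sq_le_self (by omega) hnp
      simpa [pow_two] using this
    have h2 : 2 ≤ N.minFac := hp.two_le
    have hne2 : N.minFac ≠ 2 := by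
      intro e; exact hodd (e ▸ hd)
    have hoddp : N.minFac % 2 = 1 := Nat.odd_iff.mp (hp.odd_of_ne_two hne2)
    set j : ℕ := (N.minFac - 3) / 2 with hj
    have hpj : N.minFac = 3 + 2 * j := by omega
    apply h1 j
    · rw [show (3 : Int) + 2 * (j : ℕ) = ((3 + 2 * j : ℕ) : Int) by push_cast; ring, ← hpj]
      exact_mod_cast hsq
    · rw [show (3 : Int) + 2 * (j : ℕ) = ((3 + 2 * j : ℕ) : Int) by push_cast; ring, ← hpj]
      exact_mod_cast hd
  · intro hp j hle hdvd
    set e : ℕ := 3 + 2 * j with he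
    rw [show (3 : Int) + 2 * (j : ℕ) = ((e : ℕ) : Int) by rw [he]; push_cast; ring] at hle hdvd
    have hdvd' : e ∣ N := by exact_mod_cast hdvd
    have hle' : e * e ≤ N := by exact_mod_cast hle
    have heN : e < N := by nlinarith [he ▸ (by omega : 3 ≤ e)]
    have := (Nat.prime_def_lt.mp hp).2 e heN hdvd'
    omega

theorem acc_eq (t : Int) : primeA t = accB t := by
  unfold accB
  by_cases h4 : t < 4
  · simp only [h4, if_true]
    unfold primeA
    rw [PySem.List.pyRange_one_eq_nil (by
      have : PySem.Int.floordiv t 2 < 2 := (PySem.Int.floordiv_lt_iff_lt_mul (by omega)).mpr (by omega)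
      omega)]
    simp
  · have h4' : (4 : Int) ≤ t := by omega
    lift t to ℕ using (by omega) with N
    have hN : 4 ≤ N := by exact_mod_cast h4'
    by_cases he : 2 ∣ N
    · have hm : (PySem.Int.mod (N : Int) 2 == 0) = true := by
        simp; omega
      simp only [h4, if_false, hm, if_true]
      have : ¬ N.Prime := by
        intro hp
        have := (Nat.prime_def_lt.mp hp).2 2 (by omega) he
        omega
      rw [← Bool.not_eq_true]
      rw [primeA_prime N hN]
      exact this
    · have hm : (PySem.Int.mod (N : Int) 2 == 0) = false := by
        simp
        omega
      simp only [h4, if_false, hm, Bool.false_eq_true]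
      rw [Bool.eq_iff_iff, primeA_prime N hN, trialB_prime N hN he]

theorem loop_eq (fuel : ℕ) : ∀ (m n temp : Int),
    loopB fuel (m + n + temp) = (m + n) + loopA fuel m n temp := by
  induction fuel with
  | zero => intro m n temp; simp [loopA, loopB]
  | succ fuel ih =>
    intro m n temp
    rw [loopA, loopB, ← acc_eq]
    by_cases h : primeA (m + n + temp)
    · simp [h]
    · simp only [h, Bool.false_eq_true, if_false]
      rw [show m + n + temp + 1 = m + n + (temp + 1) by ring]
      exact ih m n (temp + 1)
theorem final_eq (m n : Int) : calculate m n = calculate_alt m n := by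
  unfold calculate calculate_alt
  simp only [List.map_cons, List.map_nil]
  rw [show m + n + 1 = m + n + (1 : Int) from rfl, loop_eq]
  rw [add_sub_cancel_left]
  exact join_singleton _

-- ===== VERDICT (by name: the statement is the Claim_ definition above) =====
theorem calculate_spec : Claim_equal_calculate := by
  intro m n _
  unfold Spec_calculate
  exact final_eq m n
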